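-- pv_equiv track=rewrite | github.com/FaultMaven/FaultMaven-Mono | faultmaven/services/preprocessing/extractors/error_report_extractor.py | _get_fix_suggestions
-- ===== SOURCE A (Python) =====
-- from typing import List, Dict, Optional, Tuple
--
-- def _get_fix_suggestions(
--
--     exception_type: str,
--     exception_msg: str,
--     content: str
-- ) -> List[str]:
--     """Generate fix suggestions based on exception type and message"""
--     suggestions = []
--
--     # NullPointerException / AttributeError / TypeError
--     if any(x in exception_type for x in ['NullPointer', 'AttributeError', 'TypeError']):
--         if 'NoneType' in exception_msg or 'None' in exception_msg:
--             suggestions.append("Check for None/null values before accessing attributes or methods")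
--             suggestions.append("Add null/None checks or use optional chaining")
--         else:
--             suggestions.append("Verify object initialization before use")
--             suggestions.append("Check variable types match expected values")
--
--     # IndexError / ArrayIndexOutOfBounds
--     elif any(x in exception_type for x in ['IndexError', 'IndexOutOfBounds']):
--         suggestions.append("Verify array/list bounds before accessing elements")
--         suggestions.append("Check if collection is empty before indexing")
--
--     # KeyError / NoSuchElementException
--     elif any(x in exception_type for x in ['KeyError', 'NoSuchElement']):
--         suggestions.append("Verify key exists in dictionary/map before accessing")
--         suggestions.append("Use .get() method with default value instead of direct access")
--
--     # Connection / Network errors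
--     elif any(x in exception_type.lower() for x in ['connection', 'network', 'timeout']):
--         suggestions.append("Check network connectivity and firewall rules")
--         suggestions.append("Verify service endpoint is reachable")
--         suggestions.append("Consider implementing retry logic with exponential backoff")
--
--     # File not found / IO errors
--     elif any(x in exception_type for x in ['FileNotFound', 'IOError', 'FileNotFoundException']):
--         suggestions.append("Verify file path exists and is accessible")
--         suggestions.append("Check file permissions")
--
--     # Import / Module not found
--     elif any(x in exception_type for x in ['ImportError', 'ModuleNotFound', 'ClassNotFound']):
--         suggestions.append("Verify dependency is installed")
--         suggestions.append("Check import path and module name spelling")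
--
--     # Default suggestions
--     if not suggestions:
--         suggestions.append("Review the exception message for specific details")
--         suggestions.append("Check the root cause location in your code")
--
--     return suggestions
-- ===== SOURCE B (Python) =====
-- # Different strategy: evaluate ALL category tests eagerly into (matched, suggestions)
-- # pairs, then sweep them in REVERSE with last-write-wins overwrite, so the
-- # highest-priority matching category ends up as the result (no elif cascade,
-- # no early exit).  'NoneType' check is dropped: 'None' is its substring.
--
-- def _get_fix_suggestions(exception_type: str, exception_msg: str, content: str):
--     t = exception_type
--     low = t.lower()
--     null_sugg = (
--         ["Check for None/null values before accessing attributes or methods",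
--          "Add null/None checks or use optional chaining"]
--         if "None" in exception_msg else
--         ["Verify object initialization before use",
--          "Check variable types match expected values"]
--     )
--     outcomes = [
--         ("NullPointer" in t or "AttributeError" in t or "TypeError" in t,
--          null_sugg),
--         ("IndexError" in t or "IndexOutOfBounds" in t,
--          ["Verify array/list bounds before accessing elements",
--           "Check if collection is empty before indexing"]),
--         ("KeyError" in t or "NoSuchElement" in t,
--          ["Verify key exists in dictionary/map before accessing",
--           "Use .get() method with default value instead of direct access"]),
--         ("connection" in low or "network" in low or "timeout" in low,
--          ["Check network connectivity and firewall rules",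
--           "Verify service endpoint is reachable",
--           "Consider implementing retry logic with exponential backoff"]),
--         ("FileNotFound" in t or "IOError" in t or "FileNotFoundException" in t,
--          ["Verify file path exists and is accessible",
--           "Check file permissions"]),
--         ("ImportError" in t or "ModuleNotFound" in t or "ClassNotFound" in t,
--          ["Verify dependency is installed",
--           "Check import path and module name spelling"]),
--     ]
--     result = ["Review the exception message for specific details",
--               "Check the root cause location in your code"]
--     for matched, sugg in reversed(outcomes):
--         if matched:
--             result = sugg
--     return result
-- ===== Notes on version B (the rewrite author's own statement) =====
-- stated objective: alternative
-- what changed: A short-circuits through an if/elif cascade appending into an accumulator and patching in defaults at the end; B eagerly computes all six category tests into (matched, suggestions) pairs once and then resolves priority by a reverse last-write-wins overwrite sweep starting from the defaults, also dropping the redundant 'NoneType' check since 'None' is its substring.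
import Mathlib
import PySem

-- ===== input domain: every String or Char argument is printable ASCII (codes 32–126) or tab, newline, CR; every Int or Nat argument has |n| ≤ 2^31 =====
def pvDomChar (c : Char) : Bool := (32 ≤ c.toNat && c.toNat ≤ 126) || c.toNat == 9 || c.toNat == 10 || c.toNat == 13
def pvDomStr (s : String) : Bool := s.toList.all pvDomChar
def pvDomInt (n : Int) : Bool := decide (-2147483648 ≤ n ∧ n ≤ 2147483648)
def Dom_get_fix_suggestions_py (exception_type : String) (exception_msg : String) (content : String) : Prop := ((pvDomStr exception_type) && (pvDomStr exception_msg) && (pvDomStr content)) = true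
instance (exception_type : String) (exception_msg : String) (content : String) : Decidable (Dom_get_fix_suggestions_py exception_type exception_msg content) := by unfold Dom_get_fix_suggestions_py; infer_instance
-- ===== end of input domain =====

-- B replaces A's short-circuit if/elif cascade by eager evaluation of all category
-- tests followed by a reverse last-write-wins overwrite sweep (alternative); return value only.

-- ===== PORT A =====
def get_fix_suggestions_py (exception_type : String) (exception_msg : String) (content : String) : List String :=
  let suggestions : List String := []
  let suggestions :=
    if (["NullPointer", "AttributeError", "TypeError"] : List String).any
        (fun x => PySem.Str.isIn x exception_type) then
      if PySem.Str.isIn "NoneType" exception_msg || PySem.Str.isIn "None" exception_msg then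
        suggestions ++ ["Check for None/null values before accessing attributes or methods",
                        "Add null/None checks or use optional chaining"]
      else
        suggestions ++ ["Verify object initialization before use",
                        "Check variable types match expected values"]
    else if (["IndexError", "IndexOutOfBounds"] : List String).any
        (fun x => PySem.Str.isIn x exception_type) then
      suggestions ++ ["Verify array/list bounds before accessing elements",
                      "Check if collection is empty before indexing"]
    else if (["KeyError", "NoSuchElement"] : List String).any
        (fun x => PySem.Str.isIn x exception_type) then
      suggestions ++ ["Verify key exists in dictionary/map before accessing",
                      "Use .get() method with default value instead of direct access"]
    else if (["connection", "network", "timeout"] : List String).any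
        (fun x => PySem.Str.isIn x (PySem.Str.lower exception_type)) then
      suggestions ++ ["Check network connectivity and firewall rules",
                      "Verify service endpoint is reachable",
                      "Consider implementing retry logic with exponential backoff"]
    else if (["FileNotFound", "IOError", "FileNotFoundException"] : List String).any
        (fun x => PySem.Str.isIn x exception_type) then
      suggestions ++ ["Verify file path exists and is accessible",
                      "Check file permissions"]
    else if (["ImportError", "ModuleNotFound", "ClassNotFound"] : List String).any
        (fun x => PySem.Str.isIn x exception_type) then
      suggestions ++ ["Verify dependency is installed",
                      "Check import path and module name spelling"]
    else suggestions
  if suggestions = [] then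
    suggestions ++ ["Review the exception message for specific details",
                    "Check the root cause location in your code"]
  else suggestions

-- ===== PORT B =====
-- all category tests evaluated eagerly into (matched, suggestions) pairs, then a
-- reverse sweep overwrites the default with the last (= highest-priority) match
def get_fix_suggestions_py_alt (exception_type : String) (exception_msg : String) (content : String) : List String :=
  let t := exception_type
  let low := PySem.Str.lower t
  let nullSugg :=
    if PySem.Str.isIn "None" exception_msg then
      ["Check for None/null values before accessing attributes or methods",
       "Add null/None checks or use optional chaining"]
    else
      ["Verify object initialization before use",
       "Check variable types match expected values"]
  let outcomes : List (Bool × List String) :=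
    [ (PySem.Str.isIn "NullPointer" t || PySem.Str.isIn "AttributeError" t || PySem.Str.isIn "TypeError" t,
       nullSugg),
      (PySem.Str.isIn "IndexError" t || PySem.Str.isIn "IndexOutOfBounds" t,
       ["Verify array/list bounds before accessing elements",
        "Check if collection is empty before indexing"]),
      (PySem.Str.isIn "KeyError" t || PySem.Str.isIn "NoSuchElement" t,
       ["Verify key exists in dictionary/map before accessing",
        "Use .get() method with default value instead of direct access"]),
      (PySem.Str.isIn "connection" low || PySem.Str.isIn "network" low || PySem.Str.isIn "timeout" low,
       ["Check network connectivity and firewall rules",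
        "Verify service endpoint is reachable",
        "Consider implementing retry logic with exponential backoff"]),
      (PySem.Str.isIn "FileNotFound" t || PySem.Str.isIn "IOError" t || PySem.Str.isIn "FileNotFoundException" t,
       ["Verify file path exists and is accessible",
        "Check file permissions"]),
      (PySem.Str.isIn "ImportError" t || PySem.Str.isIn "ModuleNotFound" t || PySem.Str.isIn "ClassNotFound" t,
       ["Verify dependency is installed",
        "Check import path and module name spelling"]) ]
  let result : List String :=
    ["Review the exception message for specific details",
     "Check the root cause location in your code"]
  outcomes.reverse.foldl (fun result p => if p.1 then p.2 else result) result

-- ===== PRECONDITION & SPEC =====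
def Spec_get_fix_suggestions_py (exception_type : String) (exception_msg : String) (content : String) (out : List String) : Prop := out = get_fix_suggestions_py_alt exception_type exception_msg content
instance (exception_type : String) (exception_msg : String) (content : String) (out : List String) : Decidable (Spec_get_fix_suggestions_py exception_type exception_msg content out) := by unfold Spec_get_fix_suggestions_py; infer_instance

-- ===== CLAIM (what is proved, stated in full; the proofs are below) =====
def Claim_equal_get_fix_suggestions_py : Prop := ∀ (exception_type : String) (exception_msg : String) (content : String), Dom_get_fix_suggestions_py exception_type exception_msg content → Spec_get_fix_suggestions_py exception_type exception_msg content (get_fix_suggestions_py exception_type exception_msg content)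

-- ===== LEMMAS AND PROOFS =====
-- 'NoneType' in msg implies 'None' in msg (substring transitivity), so A's disjunction equals B's single check
lemma isIn_noneType_imp_none (m : String) :
    PySem.Str.isIn "NoneType" m = true → PySem.Str.isIn "None" m = true := by
  intro h
  rw [PySem.Str.isIn_iff_infix] at h ⊢
  exact List.IsInfix.trans ⟨[], ['T','y','p','e'], rfl⟩ h

lemma none_disj (m : String) :
    (PySem.Str.isIn "NoneType" m || PySem.Str.isIn "None" m) = PySem.Str.isIn "None" m := by
  cases h : PySem.Str.isIn "NoneType" m with
  | false => simp
  | true => rw [isIn_noneType_imp_none m h]; simp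

-- ===== VERDICT (by name: the statement is the Claim_ definition above) =====
theorem get_fix_suggestions_py_spec : Claim_equal_get_fix_suggestions_py := by
  intro t m c _
  show _ = _
  simp only [get_fix_suggestions_py, get_fix_suggestions_py_alt, none_disj,
    List.any_cons, List.any_nil, List.reverse_cons, List.reverse_nil, List.foldl,
    List.nil_append, List.cons_append, Bool.or_false, Bool.or_assoc]
  generalize (PySem.Str.isIn "NullPointer" t || (PySem.Str.isIn "AttributeError" t || PySem.Str.isIn "TypeError" t)) = b1
  generalize (PySem.Str.isIn "None" m) = b2
  generalize (PySem.Str.isIn "IndexError" t || PySem.Str.isIn "IndexOutOfBounds" t) = b3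
  generalize (PySem.Str.isIn "KeyError" t || PySem.Str.isIn "NoSuchElement" t) = b4
  generalize (PySem.Str.isIn "connection" (PySem.Str.lower t) || (PySem.Str.isIn "network" (PySem.Str.lower t) || PySem.Str.isIn "timeout" (PySem.Str.lower t))) = b5
  generalize (PySem.Str.isIn "FileNotFound" t || (PySem.Str.isIn "IOError" t || PySem.Str.isIn "FileNotFoundException" t)) = b6
  generalize (PySem.Str.isIn "ImportError" t || (PySem.Str.isIn "ModuleNotFound" t || PySem.Str.isIn "ClassNotFound" t)) = b7
  cases b1 <;> cases b2 <;> cases b3 <;> cases b4 <;> cases b5 <;> cases b6 <;> cases b7 <;> rfl
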